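-- pv_equiv track=rewrite | github.com/duythong244/Baitap04 | 6.13.py | generate_loc_phat_numbers
-- ===== SOURCE A (Python) =====
-- def generate_loc_phat_numbers(n):
--     if n <= 0:
--         return []
--
--     from itertools import product
--
--     loc_phat_numbers = []
--     for i in range(1, n + 1):
--         for combination in product('68', repeat=i):
--             loc_phat_numbers.append(int(''.join(combination)))
--
--     return sorted(loc_phat_numbers)
-- ===== SOURCE B (Python) =====
-- def generate_loc_phat_numbers(n):
--     result = []
--     frontier = [6, 8]
--     for _ in range(n):
--         result += frontier
--         frontier = [y for x in frontier for y in (x * 10 + 6, x * 10 + 8)]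
--     return result
-- ===== Notes on version B (the rewrite author's own statement) =====
-- stated objective: faster
-- what changed: Instead of building every length-i tuple with itertools.product, joining it to a string, parsing it back with int() and finally sorting, B grows the numbers arithmetically level by level (frontier x -> x*10+6, x*10+8), which emits them already in sorted order so the sort, the string building and the int() parsing all disappear.
import Mathlib
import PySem

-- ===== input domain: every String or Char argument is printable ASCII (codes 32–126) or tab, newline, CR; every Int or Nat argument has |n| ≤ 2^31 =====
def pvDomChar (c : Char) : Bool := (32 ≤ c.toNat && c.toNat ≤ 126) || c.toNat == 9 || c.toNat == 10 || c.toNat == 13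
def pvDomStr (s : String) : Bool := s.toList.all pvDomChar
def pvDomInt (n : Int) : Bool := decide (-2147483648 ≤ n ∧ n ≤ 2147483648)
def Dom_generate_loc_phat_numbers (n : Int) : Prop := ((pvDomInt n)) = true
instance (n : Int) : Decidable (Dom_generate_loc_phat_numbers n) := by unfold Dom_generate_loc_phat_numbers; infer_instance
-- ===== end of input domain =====

-- B replaces product/join/int/sort by an arithmetic level-by-level expansion (x -> x*10+6, x*10+8),
-- which produces the numbers already sorted; faster by skipping the sort and all string building/parsing.


-- ===== PORT A =====
-- itertools.product('68', repeat=i), in product's order (first position varies slowest)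
def prod68 : Nat → List (List Char)
  | 0 => [[]]
  | i + 1 => (prod68 i).map (fun t => '6' :: t) ++ (prod68 i).map (fun t => '8' :: t)

-- int(''.join(comb)): hand port of int(s), exact here because A only ever passes it a
-- nonempty string of ASCII digits (every char is '6' or '8': no sign/space/underscore cases arise)
def pyIntDigits (cs : List Char) : Int :=
  cs.foldl (fun a c => a * 10 + ((c.toNat : Int) - 48)) 0

def generate_loc_phat_numbers (n : Int) : List Int :=
  if n ≤ 0 then []
  else
    PySem.List.sorted
      ((PySem.List.pyRange 1 (n + 1) 1).foldl
        (fun acc i =>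
          (prod68 i.toNat).foldl (fun acc2 comb => acc2 ++ [pyIntDigits comb]) acc)
        [])
      (fun x => x) false

-- ===== PORT B =====
-- frontier = [y for x in frontier for y in (x*10+6, x*10+8)]
def pvStep (fr : List Int) : List Int := fr.flatMap (fun x => [x * 10 + 6, x * 10 + 8])

def generate_loc_phat_numbers_alt (n : Int) : List Int :=
  ((PySem.List.pyRange 0 n 1).foldl
    (fun st _ => (st.1 ++ st.2, pvStep st.2)) (([] : List Int), [6, 8])).1

-- ===== PRECONDITION & SPEC =====
def Spec_generate_loc_phat_numbers (n : Int) (out : List Int) : Prop := out = generate_loc_phat_numbers_alt n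
instance (n : Int) (out : List Int) : Decidable (Spec_generate_loc_phat_numbers n out) := by unfold Spec_generate_loc_phat_numbers; infer_instance

-- ===== CLAIM (what is proved, stated in full; the proofs are below) =====
def Claim_equal_generate_loc_phat_numbers : Prop := ∀ (n : Int), Dom_generate_loc_phat_numbers n → Spec_generate_loc_phat_numbers n (generate_loc_phat_numbers n)

-- ===== LEMMAS AND PROOFS =====

-- level k of the output: the 2^(k+1) numbers with k+1 digits, in order
def pvLevel (k : Nat) : List Int := pvStep^[k] [6, 8]

-- all levels below m, concatenated
def pvBlocks (m : Nat) : List Int := (List.range m).flatMap pvLevel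

-- prod68 also grows by appending a digit on the right
theorem prod68_snoc (i : Nat) :
    prod68 (i + 1) = (prod68 i).flatMap (fun t => [t ++ ['6'], t ++ ['8']]) := by
  induction i with
  | zero => rfl
  | succ i ih =>
    conv_lhs => rw [show prod68 (i + 1 + 1) = (prod68 (i+1)).map (fun t => '6' :: t) ++ (prod68 (i+1)).map (fun t => '8' :: t) from rfl, ih]
    conv_rhs => rw [show prod68 (i + 1) = (prod68 i).map (fun t => '6' :: t) ++ (prod68 i).map (fun t => '8' :: t) from rfl]
    simp [List.map_flatMap, List.flatMap_append, List.flatMap_map]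

theorem pyIntDigits_snoc (t : List Char) (d : Char) :
    pyIntDigits (t ++ [d]) = pyIntDigits t * 10 + ((d.toNat : Int) - 48) := by
  simp [pyIntDigits, List.foldl_append]

-- the values of the length-(k+1) products are exactly level k
theorem vals_eq_level (k : Nat) :
    (prod68 (k + 1)).map pyIntDigits = pvLevel k := by
  induction k with
  | zero => rfl
  | succ k ih =>
    rw [prod68_snoc, pvLevel, Function.iterate_succ_apply', ← pvLevel, ← ih]
    simp [List.map_flatMap, List.flatMap_map, pvStep, pyIntDigits_snoc]

-- bounds on level k
theorem level_bounds (k : Nat) : ∀ x ∈ pvLevel k, 6 * 10 ^ k ≤ x ∧ x < 10 ^ (k + 1) := by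
  induction k with
  | zero => intro x hx; simp [pvLevel] at hx; rcases hx with rfl | rfl <;> norm_num
  | succ k ih =>
    intro x hx
    rw [pvLevel, Function.iterate_succ_apply', ← pvLevel, pvStep] at hx
    simp only [List.mem_flatMap, List.mem_cons, List.not_mem_nil, or_false] at hx
    obtain ⟨y, hy, hx⟩ := hx
    obtain ⟨h1, h2⟩ := ih y hy
    have hA : (10:Int) ^ (k + 1) = 10 * 10 ^ k := by ring
    have hB : (10:Int) ^ (k + 1 + 1) = 10 * 10 ^ (k + 1) := by ring
    rcases hx with rfl | rfl <;> constructor <;> nlinarith [h1, h2]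

-- pvStep preserves strict sortedness
theorem pvStep_pairwise (fr : List Int) (h : fr.Pairwise (· < ·)) :
    (pvStep fr).Pairwise (· < ·) := by
  induction fr with
  | nil => simp [pvStep]
  | cons y rest ih =>
    rw [List.pairwise_cons] at h
    have : pvStep (y :: rest) = [y * 10 + 6, y * 10 + 8] ++ pvStep rest := by
      simp [pvStep]
    rw [this, List.pairwise_append]
    refine ⟨by simp, ih h.2, ?_⟩
    intro a ha b hb
    simp only [List.mem_cons, List.not_mem_nil, or_false] at ha
    simp only [pvStep, List.mem_flatMap, List.mem_cons, List.not_mem_nil, or_false] at hb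
    obtain ⟨w, hw, hb⟩ := hb
    have hyw : y < w := h.1 w hw
    rcases ha with rfl | rfl <;> rcases hb with rfl | rfl <;> omega

theorem level_pairwise (k : Nat) : (pvLevel k).Pairwise (· < ·) := by
  induction k with
  | zero => simp [pvLevel]
  | succ k ih =>
    rw [pvLevel, Function.iterate_succ_apply', ← pvLevel]
    exact pvStep_pairwise _ ih

theorem blocks_lt (m : Nat) : ∀ x ∈ pvBlocks m, x < 10 ^ m := by
  intro x hx
  simp only [pvBlocks, List.mem_flatMap, List.mem_range] at hx
  obtain ⟨j, hj, hx⟩ := hx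
  have h2 := (level_bounds j x hx).2
  calc x < 10 ^ (j + 1) := h2
    _ ≤ 10 ^ m := pow_le_pow_right₀ (by norm_num) (by omega)

theorem blocks_pairwise (m : Nat) : (pvBlocks m).Pairwise (· < ·) := by
  induction m with
  | zero => simp [pvBlocks]
  | succ m ih =>
    have : pvBlocks (m + 1) = pvBlocks m ++ pvLevel m := by
      simp [pvBlocks, List.range_succ]
    rw [this, List.pairwise_append]
    refine ⟨ih, level_pairwise m, ?_⟩
    intro x hx y hy
    have h1 := blocks_lt m x hx
    have h2 := (level_bounds m y hy).1
    calc x < 10 ^ m := h1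
      _ ≤ 6 * 10 ^ m := by nlinarith [pow_pos (show (0:Int) < 10 by norm_num) m]
      _ ≤ y := h2

-- B's loop, characterised: it accumulates the blocks and keeps the next level as frontier
theorem alt_loop (xs : List Int) : ∀ (res fr : List Int),
    xs.foldl (fun st _ => (st.1 ++ st.2, pvStep st.2)) (res, fr)
      = (res ++ (List.range xs.length).flatMap (fun k => pvStep^[k] fr), pvStep^[xs.length] fr) := by
  induction xs with
  | nil => intro res fr; simp
  | cons x xs ih =>
    intro res fr
    rw [List.foldl_cons, ih]
    simp [List.range_succ_eq_map, List.flatMap_map, Function.iterate_succ_apply,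
      List.append_assoc]

theorem alt_eq_blocks (n : Int) : generate_loc_phat_numbers_alt n = pvBlocks n.toNat := by
  unfold generate_loc_phat_numbers_alt
  rw [alt_loop]
  simp only [List.nil_append, PySem.List.length_pyRange_one]
  have : (n - 0).toNat = n.toNat := by omega
  rw [this]
  rfl

-- A's accumulated (unsorted) list is the same blocks
theorem a_core_eq_blocks (n : Int) (hn : 0 < n) :
    (PySem.List.pyRange 1 (n + 1) 1).foldl
      (fun acc i => (prod68 i.toNat).foldl (fun acc2 comb => acc2 ++ [pyIntDigits comb]) acc) []
    = pvBlocks n.toNat := by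
  have hconv : ∀ (i : Int) (acc : List Int),
      (prod68 i.toNat).foldl (fun acc2 comb => acc2 ++ [pyIntDigits comb]) acc
        = acc ++ (prod68 i.toNat).map pyIntDigits :=
    fun i acc => PySem.List.foldl_append_singleton_eq_map _ _ _
  rw [PySem.List.pyRange_one]
  have hlen : ((n + 1 - 1)).toNat = n.toNat := by omega
  rw [hlen, List.foldl_map]
  simp only [hconv]
  rw [PySem.List.foldl_append_eq_flatMap]
  unfold pvBlocks
  apply List.flatMap_congr  -- elements of range n.toNat
  intro k hk
  have : ((1 : Int) + (k : Int)).toNat = k + 1 := by omega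
  rw [this, vals_eq_level]

theorem gen_eq_blocks (n : Int) : generate_loc_phat_numbers n = pvBlocks n.toNat := by
  unfold generate_loc_phat_numbers
  split
  · have : n.toNat = 0 := by omega
    simp [this, pvBlocks]
  · rename_i h
    rw [a_core_eq_blocks n (by omega)]
    exact PySem.List.sorted_eq_self_of_pairwise _ _
      ((blocks_pairwise n.toNat).imp (fun h => le_of_lt h))

-- ===== VERDICT (by name: the statement is the Claim_ definition above) =====
theorem generate_loc_phat_numbers_spec : Claim_equal_generate_loc_phat_numbers := by
  intro n _
  show generate_loc_phat_numbers n = generate_loc_phat_numbers_alt n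
  rw [gen_eq_blocks, alt_eq_blocks]
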